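-- pv_equiv track=rewrite | github.com/the-omega-institute/automath | theory/publication/submitted_2026_folded_rotation_histogram_certificates_siads/supplementary/scripts/common_ostrowski_fold.py | value_from_digits
-- ===== SOURCE A (Python) =====
-- from typing import List, Sequence, Tuple
--
-- def denominators_from_partial_quotients(a: Sequence[int]) -> List[int]:
--     """Return denominators q_0..q_m for partial quotients a_1..a_m.
--
--     Args:
--         a: a_1..a_m (length m), each >= 1.
--     """
--     if any(x < 1 for x in a):
--         raise ValueError("All partial quotients must be >= 1")
--
--     # q_{-1}=0, q_0=1
--     q_minus_1 = 0
--     q_0 = 1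
--     qs = [q_0]
--     q_prev, q_curr = q_minus_1, q_0
--     for ak in a:
--         q_next = ak * q_curr + q_prev
--         qs.append(q_next)
--         q_prev, q_curr = q_curr, q_next
--     return qs  # length m+1: q_0..q_m
--
-- def value_from_digits(digits: Sequence[int], a: Sequence[int]) -> int:
--     """Compute N = sum_{n=1}^m d_n q_{n-1} for given digits."""
--     if len(digits) != len(a):
--         raise ValueError("digits and a must have the same length")
--     qs = denominators_from_partial_quotients(a)
--     N = 0
--     for n, dn in enumerate(digits, start=1):
--         N += int(dn) * qs[n - 1]
--     return N
-- ===== SOURCE B (Python) =====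
-- def value_from_digits(digits, a):
--     """Compute N = sum_{n=1}^m d_n q_{n-1} for given digits.
--
--     Backward Horner pass: no denominator q_k is ever computed. Scanning from
--     the end we keep (A, B) such that the remaining tail sum equals
--     A*q_{k-1} + B*q_{k-2}; at the front this is A*q_0 + B*q_{-1} = A.
--     """
--     if len(digits) != len(a):
--         raise ValueError("digits and a must have the same length")
--     if any(x < 1 for x in a):
--         raise ValueError("All partial quotients must be >= 1")
--     A = 0
--     B = 0
--     for dn, ak in zip(reversed(digits), reversed(a)):
--         A, B = int(dn) + ak * A + B, A
--     return A
-- ===== Notes on version B (the rewrite author's own statement) =====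
-- stated objective: alternative
-- what changed: B scans digits and quotients BACKWARD with a Horner-style pair update (A,B) <- (d + a*A + B, A), never computing any Ostrowski denominator q_k; A builds the full forward denominator table and sums against it.
import Mathlib
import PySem

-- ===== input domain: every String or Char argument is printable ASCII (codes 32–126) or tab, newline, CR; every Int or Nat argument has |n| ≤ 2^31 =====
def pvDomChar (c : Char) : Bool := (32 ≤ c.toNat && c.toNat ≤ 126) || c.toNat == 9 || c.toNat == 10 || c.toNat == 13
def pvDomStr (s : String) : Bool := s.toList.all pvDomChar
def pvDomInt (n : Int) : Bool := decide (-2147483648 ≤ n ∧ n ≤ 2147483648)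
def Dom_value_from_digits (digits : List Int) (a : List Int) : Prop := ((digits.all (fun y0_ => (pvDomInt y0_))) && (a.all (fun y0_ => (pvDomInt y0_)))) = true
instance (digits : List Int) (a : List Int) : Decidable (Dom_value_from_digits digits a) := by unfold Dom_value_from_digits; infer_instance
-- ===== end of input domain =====

-- B replaces A's forward denominator table entirely: it scans digits and quotients
-- BACKWARD with a Horner-style pair update and never computes any denominator q_k.
-- A's two ValueError paths (length mismatch; a partial quotient < 1) are excluded by Pre_.

-- ===== PORT A =====
-- denominators_from_partial_quotients: the validation raise is excluded by Pre_;
-- the loop appends q_next = ak*q_curr + q_prev, state (qs, q_prev, q_curr)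
def pvDenomsA (a : List Int) : List Int :=
  (a.foldl (fun (st : List Int × Int × Int) ak =>
      let q_next := ak * st.2.2 + st.2.1
      (st.1 ++ [q_next], st.2.2, q_next)) ([1], 0, 1)).1

-- qs[n-1]: the index is nonnegative and (under Pre_) in range, so List.getD is exact there
def value_from_digits (digits : List Int) (a : List Int) : Int :=
  let qs := pvDenomsA a
  (digits.foldl (fun (st : Int × Nat) dn =>
      (st.1 + dn * (qs.getD st.2 0), st.2 + 1)) (0, 0)).1

-- ===== PORT B =====
-- backward pass over zip(reversed(digits), reversed(a)); state (A, B)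
def value_from_digits_alt (digits : List Int) (a : List Int) : Int :=
  ((digits.reverse.zip a.reverse).foldl (fun (st : Int × Int) p =>
      (p.1 + p.2 * st.1 + st.2, st.1)) (0, 0)).1

-- ===== PRECONDITION & SPEC =====
-- Pre_ excludes exactly the two ValueError raises of A: mismatched lengths, or some a_k < 1.
def Pre_value_from_digits (digits : List Int) (a : List Int) : Prop :=
  digits.length = a.length ∧ ∀ x ∈ a, 1 ≤ x
instance (digits : List Int) (a : List Int) : Decidable (Pre_value_from_digits digits a) := by
  unfold Pre_value_from_digits; infer_instance

def pvWitness_value_from_digits : List Int × List Int := ([3, -1, 2], [1, 2, 1])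

def Spec_value_from_digits (digits : List Int) (a : List Int) (out : Int) : Prop := out = value_from_digits_alt digits a
instance (digits : List Int) (a : List Int) (out : Int) : Decidable (Spec_value_from_digits digits a out) := by unfold Spec_value_from_digits; infer_instance

-- ===== CLAIM (what is proved, stated in full; the proofs are below) =====
def Claim_equal_value_from_digits : Prop := ∀ (digits : List Int) (a : List Int), Dom_value_from_digits digits a → Pre_value_from_digits digits a → Spec_value_from_digits digits a (value_from_digits digits a)

-- ===== LEMMAS AND PROOFS =====

-- tail of the denominator table below (q_prev, q_curr)
def pvTail (qp qc : Int) : List Int → List Int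
  | [] => []
  | ak :: rest => (ak * qc + qp) :: pvTail qc (ak * qc + qp) rest

-- recursive description of A's weighted sum, parametric in the two seed denominators
def pvSum : List Int → List Int → Int → Int → Int
  | [], _, _, _ => 0
  | _ :: _, [], _, _ => 0
  | d :: ds, ak :: rest, qp, qc => d * qc + pvSum ds rest qc (ak * qc + qp)

-- recursive description of B's backward pair
def pvBack : List Int → List Int → Int × Int
  | [], _ => (0, 0)
  | _ :: _, [] => (0, 0)
  | d :: ds, ak :: rest =>
      let p := pvBack ds rest
      (d + ak * p.1 + p.2, p.1)

theorem pvDenomsA_fold (a : List Int) : ∀ (qs : List Int) (qp qc : Int),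
    (a.foldl (fun (st : List Int × Int × Int) ak =>
      let q_next := ak * st.2.2 + st.2.1
      (st.1 ++ [q_next], st.2.2, q_next)) (qs, qp, qc)).1 = qs ++ pvTail qp qc a := by
  induction a with
  | nil => intro qs qp qc; simp [pvTail]
  | cons ak rest ih =>
      intro qs qp qc
      simp only [List.foldl_cons, pvTail]
      rw [ih]
      simp

theorem pvDenomsA_eq (a : List Int) : pvDenomsA a = 1 :: pvTail 0 1 a := by
  unfold pvDenomsA
  rw [pvDenomsA_fold]
  rfl

theorem afold_eq (digits : List Int) : ∀ (a pre : List Int) (qp qc N : Int),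
    digits.length ≤ a.length →
    (digits.foldl (fun (st : Int × Nat) dn =>
        (st.1 + dn * ((pre ++ qc :: pvTail qp qc a).getD st.2 0), st.2 + 1)) (N, pre.length)).1
      = N + pvSum digits a qp qc := by
  induction digits with
  | nil => intro a pre qp qc N _; simp [pvSum]
  | cons d ds ih =>
      intro a pre qp qc N hlen
      cases a with
      | nil => simp at hlen
      | cons ak rest =>
          simp only [List.foldl_cons, pvSum, pvTail]
          have hget : (pre ++ qc :: (ak * qc + qp) :: pvTail qc (ak * qc + qp) rest).getD pre.length 0 = qc := by
            simp [List.getD_eq_getElem?_getD]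
          rw [hget]
          have hpre : (pre ++ qc :: (ak * qc + qp) :: pvTail qc (ak * qc + qp) rest)
              = (pre ++ [qc]) ++ (ak * qc + qp) :: pvTail qc (ak * qc + qp) rest := by simp
          have hlen' : pre.length + 1 = (pre ++ [qc]).length := by simp
          rw [hpre, hlen']
          rw [ih rest (pre ++ [qc]) qc (ak * qc + qp) (N + d * qc) (by simpa using Nat.le_of_succ_le_succ hlen)]
          ring

-- B's foldl over the reversed zip is the foldr of the un-reversed zip, i.e. pvBack
theorem bfold_eq_back (digits : List Int) : ∀ (a : List Int), digits.length = a.length →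
    ((digits.reverse.zip a.reverse).foldl (fun (st : Int × Int) p =>
        (p.1 + p.2 * st.1 + st.2, st.1)) (0, 0)) = pvBack digits a := by
  induction digits with
  | nil => intro a h; cases a with
      | nil => rfl
      | cons _ _ => simp at h
  | cons d ds ih =>
      intro a h
      cases a with
      | nil => simp at h
      | cons ak rest =>
          have hlen : ds.reverse.length = rest.reverse.length := by
            simpa using Nat.succ_injective h
          simp only [List.reverse_cons]
          rw [List.zip_append hlen, List.foldl_append]
          have : (ds.reverse.zip rest.reverse).foldl (fun (st : Int × Int) p =>
              (p.1 + p.2 * st.1 + st.2, st.1)) (0, 0) = pvBack ds rest :=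
            ih rest (Nat.succ_injective h)
          rw [this]
          simp [pvBack, List.zip_cons_cons]

-- the backward invariant: pvSum against any seeds (qp, qc) is the pvBack pair applied to them
theorem back_correct (digits : List Int) : ∀ (a : List Int) (qp qc : Int),
    pvSum digits a qp qc = (pvBack digits a).1 * qc + (pvBack digits a).2 * qp := by
  induction digits with
  | nil => intro a qp qc; cases a <;> simp [pvSum, pvBack]
  | cons d ds ih =>
      intro a qp qc
      cases a with
      | nil => simp [pvSum, pvBack]
      | cons ak rest =>
          simp only [pvSum, pvBack]
          rw [ih]
          ring

-- ===== VERDICT (by name: the statement is the Claim_ definition above) =====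
theorem value_from_digits_spec : Claim_equal_value_from_digits := by
  intro digits a _ hpre
  unfold Spec_value_from_digits value_from_digits value_from_digits_alt
  rw [pvDenomsA_eq]
  have hA := afold_eq digits a [] 0 1 0 (le_of_eq hpre.1)
  simp only [List.nil_append, List.length_nil] at hA
  rw [hA, bfold_eq_back digits a hpre.1]
  have := back_correct digits a 0 1
  omega
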